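-- pv_equiv track=rewrite | github.com/glopez99/advent_of_code | 2020/Day11/Day11.py | findFirstLeftSeat
-- ===== SOURCE A (Python) =====
-- def findFirstLeftSeat(i, j, currentSeating):
--   if currentSeating[i][j] == ".":
--     j = j - 1
--     if j >= 0:
--       return findFirstLeftSeat(i, j, currentSeating)
--     else:
--       return "L"
--   else:
--     return currentSeating[i][j]
-- ===== SOURCE B (Python) =====
-- def findFirstLeftSeat(i, j, currentSeating):
--     row = currentSeating[i]
--     while row[j] == ".":
--         j -= 1
--         if j < 0:
--             return "L"
--     return row[j]
-- ===== Notes on version B (the rewrite author's own statement) =====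
-- stated objective: idiomatic
-- what changed: Replaces the full-argument recursion (which re-indexes currentSeating[i] on every call) with an iterative while loop over a single mutable index into the row fetched once.
import Mathlib
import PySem

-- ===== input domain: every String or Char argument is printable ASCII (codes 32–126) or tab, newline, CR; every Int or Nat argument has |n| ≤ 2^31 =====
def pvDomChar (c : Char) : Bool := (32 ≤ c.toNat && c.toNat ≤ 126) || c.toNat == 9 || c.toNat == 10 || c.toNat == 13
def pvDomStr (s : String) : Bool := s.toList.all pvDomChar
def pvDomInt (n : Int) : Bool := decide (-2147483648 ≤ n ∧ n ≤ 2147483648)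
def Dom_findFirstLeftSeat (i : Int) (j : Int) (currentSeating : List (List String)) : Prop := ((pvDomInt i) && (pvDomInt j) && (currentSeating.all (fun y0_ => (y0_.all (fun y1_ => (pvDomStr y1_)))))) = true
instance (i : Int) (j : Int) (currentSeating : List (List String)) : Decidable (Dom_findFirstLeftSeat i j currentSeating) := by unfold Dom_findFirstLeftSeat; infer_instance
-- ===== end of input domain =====

-- B replaces A's full-argument recursion by an iterative leftward loop over a single
-- index into the row fetched once; return value only, no mutation is observable.

-- ===== PORT A =====
def findFirstLeftSeat (i : Int) (j : Int) (currentSeating : List (List String)) : String :=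
  match PySem.List.pyGet? currentSeating i with
  | none => ""   -- IndexError, excluded by Pre_
  | some row =>
    match PySem.List.pyGet? row j with
    | none => ""   -- IndexError, excluded by Pre_
    | some c =>
      if c == "." then
        if h : j - 1 ≥ 0 then findFirstLeftSeat i (j - 1) currentSeating
        else "L"
      else c
termination_by j.toNat
decreasing_by omega

-- ===== PORT B =====
-- the 'while row[j] == ".":' loop of Source B, over the fixed row and the mutable index j
def pvLoopLeft (row : List String) (j : Int) : String :=
  match PySem.List.pyGet? row j with
  | none => ""   -- IndexError, excluded by Pre_
  | some c =>
    if c == "." then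
      if h : j - 1 < 0 then "L"
      else pvLoopLeft row (j - 1)
    else c
termination_by j.toNat
decreasing_by omega

def findFirstLeftSeat_alt (i : Int) (j : Int) (currentSeating : List (List String)) : String :=
  match PySem.List.pyGet? currentSeating i with
  | none => ""   -- IndexError, excluded by Pre_
  | some row => pvLoopLeft row j

-- ===== PRECONDITION & SPEC =====
-- Pre_ excludes exactly the IndexError inputs: the initial accesses currentSeating[i]
-- and currentSeating[i][j] must be in range; every later access uses a smaller
-- nonnegative index of the same row, hence is then automatically in range.
def Pre_findFirstLeftSeat (i : Int) (j : Int) (currentSeating : List (List String)) : Prop :=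
  PySem.Raise.InRange currentSeating.length i ∧
  PySem.Raise.InRange (PySem.List.pyGetD currentSeating i []).length j
instance (i : Int) (j : Int) (currentSeating : List (List String)) : Decidable (Pre_findFirstLeftSeat i j currentSeating) := by unfold Pre_findFirstLeftSeat; infer_instance

def pvWitness_findFirstLeftSeat : Int × Int × List (List String) := (0, 1, [[".", "#"]])

def Spec_findFirstLeftSeat (i : Int) (j : Int) (currentSeating : List (List String)) (out : String) : Prop := out = findFirstLeftSeat_alt i j currentSeating
instance (i : Int) (j : Int) (currentSeating : List (List String)) (out : String) : Decidable (Spec_findFirstLeftSeat i j currentSeating out) := by unfold Spec_findFirstLeftSeat; infer_instance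

-- ===== CLAIM (what is proved, stated in full; the proofs are below) =====
def Claim_equal_findFirstLeftSeat : Prop := ∀ (i : Int) (j : Int) (currentSeating : List (List String)), Dom_findFirstLeftSeat i j currentSeating → Pre_findFirstLeftSeat i j currentSeating → Spec_findFirstLeftSeat i j currentSeating (findFirstLeftSeat i j currentSeating)

-- ===== LEMMAS AND PROOFS =====

theorem loop_eq (i : Int) (currentSeating : List (List String)) (row : List String)
    (hrow : PySem.List.pyGet? currentSeating i = some row) (j : Int) :
    findFirstLeftSeat i j currentSeating = pvLoopLeft row j := by
  induction hn : j.toNat generalizing j with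
  | zero =>
    rw [findFirstLeftSeat, pvLoopLeft, hrow]
    cases h : PySem.List.pyGet? row j with
    | none => simp only [h]
    | some c =>
      simp only [h]
      by_cases hc : (c == ".") = true
      · simp only [hc, if_pos]
        rw [dif_neg (by omega), dif_pos (by omega)]
      · simp [hc]
  | succ n ih =>
    rw [findFirstLeftSeat, pvLoopLeft, hrow]
    cases h : PySem.List.pyGet? row j with
    | none => simp only [h]
    | some c =>
      simp only [h]
      by_cases hc : (c == ".") = true
      · simp only [hc, if_pos]
        by_cases hj : j - 1 ≥ 0
        · rw [dif_pos hj, dif_neg (by omega)]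
          exact ih (j - 1) (by omega)
        · rw [dif_neg hj, dif_pos (by omega)]
      · simp [hc]

-- ===== VERDICT (by name: the statement is the Claim_ definition above) =====
theorem findFirstLeftSeat_spec : Claim_equal_findFirstLeftSeat := by
  intro i j cs _ _
  unfold Spec_findFirstLeftSeat findFirstLeftSeat_alt
  cases h : PySem.List.pyGet? cs i with
  | none => rw [findFirstLeftSeat, h]
  | some row => exact loop_eq i cs row h j
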